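-- pv_equiv track=rewrite | github.com/roma-p/neovit | tests/test_graph_func.py | pick_colors
-- ===== SOURCE A (Python) =====
-- from itertools import cycle
--
-- def pick_colors(number):
--     COLORS = cycle((
--         "red",
--         "blue",
--         "green",
--         "magenta",
--         "yellow",
--         "cyan",
--     ))
--     ret = []
--     for i in range(number):
--         ret.append(next(COLORS))
--     return tuple(ret)
-- ===== SOURCE B (Python) =====
-- COLORS = (
--     "red",
--     "blue",
--     "green",
--     "magenta",
--     "yellow",
--     "cyan",
-- )
--
-- def pick_colors(number):
--     # replicate the palette enough times, then slice the first `number` items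
--     return (COLORS * (number // 6 + 1))[:number]
-- ===== Notes on version B (the rewrite author's own statement) =====
-- stated objective: simpler
-- what changed: Replaces the itertools.cycle iterator and per-element append loop with a single replicate-then-slice expression: the palette tuple is repeated enough times and the first `number` elements are taken.
import Mathlib
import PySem

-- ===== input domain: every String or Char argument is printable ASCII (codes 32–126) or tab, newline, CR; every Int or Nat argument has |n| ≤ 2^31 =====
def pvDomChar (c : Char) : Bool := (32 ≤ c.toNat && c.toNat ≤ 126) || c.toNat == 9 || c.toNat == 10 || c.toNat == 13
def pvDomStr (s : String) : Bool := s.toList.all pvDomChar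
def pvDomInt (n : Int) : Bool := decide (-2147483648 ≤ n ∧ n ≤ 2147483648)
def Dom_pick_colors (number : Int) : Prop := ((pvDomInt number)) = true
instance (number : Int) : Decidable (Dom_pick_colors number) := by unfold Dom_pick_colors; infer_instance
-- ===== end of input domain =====

-- B replaces A's itertools.cycle + per-element append loop by replicate-then-slice (objective: simpler).

-- ===== PORT A =====
def pvColors : List String := ["red", "blue", "green", "magenta", "yellow", "cyan"]

-- itertools.cycle over a fixed 6-tuple is modelled by the index of the next element:
-- next(COLORS) yields pvColors[i % 6] and advances i (exact for a cycle over a fixed finite tuple).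
def pick_colors (number : Int) : List String :=
  ((PySem.List.pyRange 0 number 1).foldl
    (fun (st : Nat × List String) _ => (st.1 + 1, st.2 ++ [pvColors.getD (st.1 % 6) ""]))
    (0, ([] : List String))).2

-- ===== PORT B =====
-- tuple * k for k ≤ 0 is empty in Python, matching Int.toNat of the repetition count.
def pick_colors_alt (number : Int) : List String :=
  PySem.List.slice ((List.replicate (PySem.Int.floordiv number 6 + 1).toNat pvColors).flatten)
    none (some number)

-- ===== PRECONDITION & SPEC =====
def Spec_pick_colors (number : Int) (out : List String) : Prop := out = pick_colors_alt number
instance (number : Int) (out : List String) : Decidable (Spec_pick_colors number out) := by unfold Spec_pick_colors; infer_instance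

-- ===== CLAIM (what is proved, stated in full; the proofs are below) =====
def Claim_equal_pick_colors : Prop := ∀ (number : Int), Dom_pick_colors number → Spec_pick_colors number (pick_colors number)

-- ===== LEMMAS AND PROOFS =====

theorem pv_loopA (l : List Int) (s : Nat) (acc : List String) :
    (l.foldl
      (fun (st : Nat × List String) _ => (st.1 + 1, st.2 ++ [pvColors.getD (st.1 % 6) ""]))
      (s, acc)).2
      = acc ++ (List.range l.length).map (fun j => pvColors.getD ((s + j) % 6) "") := by
  induction l generalizing s acc with
  | nil => simp
  | cons x t ih =>
    simp only [List.foldl_cons, List.length_cons, ih, List.range_succ_eq_map,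
      List.map_cons, List.map_map]
    simp [Function.comp, Nat.add_comm, Nat.add_left_comm]

theorem pv_flatten_replicate (k : Nat) :
    (List.replicate k pvColors).flatten
      = (List.range (6 * k)).map (fun j => pvColors.getD (j % 6) "") := by
  induction k with
  | zero => simp
  | succ k ih =>
    have h6 : 6 * (k + 1) = 6 + 6 * k := by ring
    rw [List.replicate_succ, List.flatten_cons, ih, h6, List.range_add, List.map_append,
      List.map_map]
    congr 1
    apply List.map_congr_left
    intro x _
    simp [Function.comp, Nat.add_mod_left]

-- ===== VERDICT (by name: the statement is the Claim_ definition above) =====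
theorem pick_colors_spec : Claim_equal_pick_colors := by
  intro number _
  unfold Spec_pick_colors pick_colors pick_colors_alt
  rcases le_or_gt number 0 with hle | hpos
  · rw [PySem.List.pyRange_one_eq_nil (by omega)]
    rcases lt_or_eq_of_le hle with hlt | heq
    · have hf : PySem.Int.floordiv number 6 < 0 :=
        (PySem.Int.floordiv_lt_iff_lt_mul (by norm_num)).2 (by omega)
      have ht : (PySem.Int.floordiv number 6 + 1).toNat = 0 := by omega
      rw [ht]
      simp [PySem.List.slice]
    · subst heq
      rw [PySem.List.slice_to _ le_rfl]
      simp
  · obtain ⟨n, rfl⟩ : ∃ n : Nat, number = (n : Int) := ⟨number.toNat, by omega⟩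
    have hfd : PySem.Int.floordiv (n : Int) 6 = ((n / 6 : Nat) : Int) := by
      exact_mod_cast PySem.Int.floordiv_natCast n 6
    have htn : (PySem.Int.floordiv (n : Int) 6 + 1).toNat = n / 6 + 1 := by
      rw [hfd]; omega
    rw [pv_loopA, htn, pv_flatten_replicate, PySem.List.slice_to_natCast, ← List.map_take,
      List.take_range]
    have hmin : min n (6 * (n / 6 + 1)) = n := by omega
    rw [hmin]
    simp [PySem.List.length_pyRange_one]
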